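-- pv_equiv track=rewrite | github.com/BrahminiA/maixml | smallestsubsting.py | maxdistinct
-- ===== SOURCE A (Python) =====
-- totalchar = 256
--
-- def maxdistinct(str, n):
-- 	count = [0] * totalchar
-- 	for i in range(n):
-- 		count[ord(str[i])] += 1
-- 	max_distinct = 0
-- 	for i in range(totalchar):
-- 		if (count[i] != 0):
-- 			max_distinct += 1
-- 	return max_distinct
-- ===== SOURCE B (Python) =====
-- def maxdistinct(str, n):
--     prefix = sorted(str[i] for i in range(n))
--     distinct = 0
--     prev = None
--     for c in prefix:
--         if c != prev:
--             distinct += 1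
--             prev = c
--     return distinct
-- ===== Notes on version B (the rewrite author's own statement) =====
-- stated objective: alternative
-- what changed: Replaces the 256-slot frequency array plus a second fixed 256-iteration nonzero-scan with sort-then-scan: sort the first n characters and count the run boundaries (positions where a character differs from its predecessor).
import Mathlib
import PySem

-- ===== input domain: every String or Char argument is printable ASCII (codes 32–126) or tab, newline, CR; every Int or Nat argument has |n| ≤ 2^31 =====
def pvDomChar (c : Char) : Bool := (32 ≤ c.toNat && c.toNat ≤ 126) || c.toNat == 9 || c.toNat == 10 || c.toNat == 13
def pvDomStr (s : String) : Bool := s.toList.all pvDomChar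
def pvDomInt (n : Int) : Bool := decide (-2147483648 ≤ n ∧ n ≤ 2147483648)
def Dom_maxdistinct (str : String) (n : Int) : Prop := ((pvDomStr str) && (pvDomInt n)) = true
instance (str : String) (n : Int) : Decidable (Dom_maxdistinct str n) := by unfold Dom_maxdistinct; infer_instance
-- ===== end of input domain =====

-- B replaces A's 256-slot frequency array and second 256-iteration nonzero-scan with
-- sort-then-scan: sort the first n characters and count run boundaries; same result.


-- ===== PORT A =====
-- count = [0]*256; for i in range(n): count[ord(str[i])] += 1;
-- then scan range(256) counting the nonzero slots.
def maxdistinct (str : String) (n : Int) : Int :=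
  let chars := str.toList
  let count : List Int := List.replicate 256 0
  let count := (PySem.List.pyRange 0 n 1).foldl (fun count i =>
      let c : Int := ((PySem.List.pyGetD chars i ' ').toNat : Int)
      PySem.List.pySetD count c (PySem.List.pyGetD count c 0 + 1)) count
  (PySem.List.pyRange 0 256 1).foldl (fun md i =>
      if PySem.List.pyGetD count i 0 ≠ 0 then md + 1 else md) 0

-- ===== PORT B =====
-- prefix = sorted(str[i] for i in range(n)); then scan prefix counting the
-- positions where the character differs from its predecessor (prev starts None).
def maxdistinct_alt (str : String) (n : Int) : Int :=
  let chars := str.toList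
  let pref := PySem.List.sorted
      ((PySem.List.pyRange 0 n 1).map (fun i => PySem.List.pyGetD chars i ' '))
      (fun c => c) false
  let st := pref.foldl (fun (st : Int × Option Char) c =>
      if some c ≠ st.2 then (st.1 + 1, some c) else st) (0, none)
  st.1

-- ===== PRECONDITION & SPEC =====
-- Pre_ excludes exactly n > len(str), where Python A (and B alike) raises IndexError on str[i].
def Pre_maxdistinct (str : String) (n : Int) : Prop := n ≤ (str.toList.length : Int)
instance (str : String) (n : Int) : Decidable (Pre_maxdistinct str n) := by unfold Pre_maxdistinct; infer_instance
def pvWitness_maxdistinct : String × Int := ("hello", 5)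

def Spec_maxdistinct (str : String) (n : Int) (out : Int) : Prop := out = maxdistinct_alt str n
instance (str : String) (n : Int) (out : Int) : Decidable (Spec_maxdistinct str n out) := by unfold Spec_maxdistinct; infer_instance

-- ===== CLAIM (what is proved, stated in full; the proofs are below) =====
def Claim_equal_maxdistinct : Prop := ∀ (str : String) (n : Int), Dom_maxdistinct str n → Pre_maxdistinct str n → Spec_maxdistinct str n (maxdistinct str n)

-- ===== LEMMAS AND PROOFS =====

-- A fold over range(0, k) reading xs[i] is a fold over the prefix xs.take k (k ≤ len xs).
theorem foldl_pyRange_take {α β : Type} (f : β → α → β) (d : α) :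
    ∀ (k : Nat) (xs : List α) (init : β), k ≤ xs.length →
      (PySem.List.pyRange 0 (k : Int) 1).foldl (fun acc j => f acc (PySem.List.pyGetD xs j d)) init
        = (xs.take k).foldl f init := by
  intro k
  induction k with
  | zero => intro xs init _; simp
  | succ m ih =>
      intro xs init h
      have : ((m + 1 : Nat) : Int) = (m : Int) + 1 := by push_cast; ring
      rw [this, PySem.List.pyRange_one_succ_right (by omega), List.foldl_append]
      rw [ih xs init (by omega)]
      have htake : xs.take (m + 1) = xs.take m ++ [xs[m]'(by omega)] := by
        rw [List.take_add_one, List.getElem?_eq_getElem (by omega)]; rfl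
      rw [htake, List.foldl_append]
      simp [PySem.List.pyGetD_natCast, List.getD_eq_getElem?_getD,
            List.getElem?_eq_getElem (show m < xs.length by omega)]

-- A map over range(0, k) reading xs[i] is the prefix xs.take k (k ≤ len xs).
theorem map_pyRange_take {α : Type} (d : α) :
    ∀ (k : Nat) (xs : List α), k ≤ xs.length →
      (PySem.List.pyRange 0 (k : Int) 1).map (fun j => PySem.List.pyGetD xs j d)
        = xs.take k := by
  intro k
  induction k with
  | zero => intro xs _; simp
  | succ m ih =>
      intro xs h
      have : ((m + 1 : Nat) : Int) = (m : Int) + 1 := by push_cast; ring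
      rw [this, PySem.List.pyRange_one_succ_right (by omega), List.map_append, ih xs (by omega)]
      have htake : xs.take (m + 1) = xs.take m ++ [xs[m]'(by omega)] := by
        rw [List.take_add_one, List.getElem?_eq_getElem (by omega)]; rfl
      rw [htake]
      simp [PySem.List.pyGetD_natCast, List.getD_eq_getElem?_getD,
            List.getElem?_eq_getElem (show m < xs.length by omega)]

-- getD after set on a valid slot.
theorem getD_set_valid (xs : List Int) (i a : Nat) (v : Int) (h : i < xs.length) :
    (xs.set i v).getD a 0 = if a = i then v else xs.getD a 0 := by
  rw [List.getD_eq_getElem?_getD, List.getD_eq_getElem?_getD, List.getElem?_set]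
  split_ifs with h1 h2
  · simp
  · omega
  · omega
  · rfl

-- The frequency array after A's first loop: slot j holds the number of occurrences
-- of the character with code j among the processed characters (codes < 256).
theorem count_invariant (L : List Char) (hL : ∀ c ∈ L, c.toNat < 256) :
    ∀ (count : List Int), count.length = 256 →
      ∀ (j : Nat), j < 256 →
      PySem.List.pyGetD
        (L.foldl (fun count c =>
          PySem.List.pySetD count ((c.toNat : Int)) (PySem.List.pyGetD count ((c.toNat : Int)) 0 + 1)) count)
        ((j : Nat) : Int) 0
      = PySem.List.pyGetD count ((j : Nat) : Int) 0 + (L.countP (fun c => c.toNat == j) : Int) := by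
  induction L with
  | nil => intro count _ j _; simp
  | cons c L ih =>
      intro count hlen j hj
      have hc : c.toNat < 256 := hL c (by simp)
      simp only [List.foldl_cons, PySem.List.pySetD_natCast, PySem.List.pyGetD_natCast] at *
      rw [ih (fun x hx => hL x (by simp [hx])) _ (by simp [hlen]) j hj]
      rw [getD_set_valid _ _ _ _ (by omega)]
      by_cases hcj : j = c.toNat
      · simp [hcj]; ring
      · have hne : (c.toNat == j) = false := by simp; omega
        simp [hcj, hne]

-- A fold adding 1 under a test is the countP of the test (Int-valued accumulator).
theorem foldl_if_add_one {α : Type} (p : α → Bool) :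
    ∀ (l : List α) (acc : Int),
      l.foldl (fun acc x => if p x then acc + 1 else acc) acc = acc + (l.countP p : Int) := by
  intro l
  induction l with
  | nil => intro acc; simp
  | cons x l ih =>
      intro acc
      simp only [List.foldl_cons, List.countP_cons]
      by_cases h : p x <;> simp [h, ih] <;> omega

theorem char_toNat_injective : Function.Injective Char.toNat := by
  exact StrictMono.injective fun _ _ h => h

-- Counting the codes 0..255 that occur in L equals the number of distinct chars of L.
theorem countP_range_eq_distinct (L : List Char) (hL : ∀ c ∈ L, c.toNat < 256) :
    (PySem.List.pyRange 0 256 1).countP (fun i => decide (∃ c ∈ L, (c.toNat : Int) = i))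
      = (PySem.Set.ofList L).length := by
  have hmem : ∀ x, x ∈ (PySem.List.pyRange 0 256 1).filter (fun i => decide (∃ c ∈ L, (c.toNat : Int) = i))
      ↔ x ∈ (PySem.Set.ofList L).map (fun c => (c.toNat : Int)) := by
    intro x
    simp only [List.mem_filter, PySem.List.mem_pyRange_one, List.mem_map, decide_eq_true_eq,
      PySem.Set.mem_ofList]
    constructor
    · rintro ⟨_, c, hc, rfl⟩; exact ⟨c, hc, rfl⟩
    · rintro ⟨c, hc, rfl⟩
      exact ⟨⟨by positivity, by exact_mod_cast hL c hc⟩, c, hc, rfl⟩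
  have hperm : ((PySem.List.pyRange 0 256 1).filter
        (fun i => decide (∃ c ∈ L, (c.toNat : Int) = i))).Perm
      ((PySem.Set.ofList L).map (fun c => (c.toNat : Int))) := by
    rw [List.perm_ext_iff_of_nodup]
    · exact hmem
    · exact (PySem.List.nodup_pyRange_one 0 256).filter _
    · exact (PySem.Set.nodup_ofList L).map (fun a b h =>
        char_toNat_injective (by exact_mod_cast h))
  rw [List.countP_eq_length_filter, hperm.length_eq, List.length_map]

-- A's 256-slot scan of the final array counts exactly the distinct characters of L.
theorem core (L : List Char) (hL : ∀ c ∈ L, c.toNat < 256) :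
    (PySem.List.pyRange 0 256 1).foldl (fun md i =>
        if PySem.List.pyGetD
            (L.foldl (fun count c =>
              PySem.List.pySetD count ((c.toNat : Int)) (PySem.List.pyGetD count ((c.toNat : Int)) 0 + 1))
              (List.replicate 256 (0 : Int))) i 0 ≠ 0 then md + 1 else md) 0
      = ((PySem.Set.ofList L).length : Int) := by
  set count := L.foldl (fun count c =>
      PySem.List.pySetD count ((c.toNat : Int)) (PySem.List.pyGetD count ((c.toNat : Int)) 0 + 1))
      (List.replicate 256 (0 : Int)) with hcount
  have hslot : ∀ (j : Nat), j < 256 →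
      PySem.List.pyGetD count ((j : Nat) : Int) 0 = (L.countP (fun c => c.toNat == j) : Int) := by
    intro j hj
    rw [hcount, count_invariant L hL (List.replicate 256 (0 : Int)) (by rw [List.length_replicate]) j hj]
    rw [PySem.List.pyGetD_natCast, List.getD_replicate 0 hj, Int.zero_add]
  have hpred : ∀ i ∈ PySem.List.pyRange 0 256 1,
      (decide (PySem.List.pyGetD count i 0 ≠ 0)) = decide (∃ c ∈ L, (c.toNat : Int) = i) := by
    intro i hi
    rw [PySem.List.mem_pyRange_one] at hi
    obtain ⟨h0, h256⟩ := hi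
    obtain ⟨j, rfl⟩ : ∃ j : Nat, i = (j : Int) := ⟨i.toNat, by omega⟩
    have hj : j < 256 := by exact_mod_cast h256
    rw [hslot j hj]
    simp only [decide_eq_decide]
    rw [Int.natCast_ne_zero, ← Nat.pos_iff_ne_zero, List.countP_pos_iff]
    constructor
    · rintro ⟨c, hc, hcj⟩; exact ⟨c, hc, by simpa using hcj⟩
    · rintro ⟨c, hc, hcj⟩; exact ⟨c, hc, by simp; exact_mod_cast hcj⟩
  calc (PySem.List.pyRange 0 256 1).foldl (fun md i =>
          if PySem.List.pyGetD count i 0 ≠ 0 then md + 1 else md) 0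
      = (PySem.List.pyRange 0 256 1).foldl (fun md i =>
          if decide (∃ c ∈ L, (c.toNat : Int) = i) then md + 1 else md) 0 := by
        apply PySem.List.foldl_congr_mem
        intro md i hi
        rw [← hpred i hi]
        simp
    _ = ((PySem.Set.ofList L).length : Int) := by
        rw [foldl_if_add_one (fun i => decide (∃ c ∈ L, (c.toNat : Int) = i))
              (PySem.List.pyRange 0 256 1) 0]
        rw [countP_range_eq_distinct L hL]
        simp

-- Folding Set.add into c :: s keeps the head and drops further c's.
theorem addFoldl_cons : ∀ (L : List Char) (c : Char) (s : List Char),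
    L.foldl PySem.Set.add (c :: s) = c :: (L.filter (fun x => x ≠ c)).foldl PySem.Set.add s := by
  intro L
  induction L with
  | nil => intro c s; simp
  | cons x L ih =>
      intro c s
      by_cases hxc : x = c
      · subst hxc
        have : PySem.Set.add (x :: s) x = x :: s := by
          simp [PySem.Set.add, PySem.Set.contains]
        simp [ih]
      · have hcont : PySem.Set.contains (c :: s) x = PySem.Set.contains s x := by
          simp [PySem.Set.contains, hxc]
        have hadd : PySem.Set.add (c :: s) x = c :: PySem.Set.add s x := by
          simp only [PySem.Set.add, hcont]
          split_ifs <;> simp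
        simp only [List.foldl_cons, hadd, ih, List.filter_cons]
        simp [hxc]

-- ofList of a cons: head stays, later copies of the head disappear.
theorem ofList_cons (c : Char) (T : List Char) :
    PySem.Set.ofList (c :: T) = c :: PySem.Set.ofList (T.filter (fun x => x ≠ c)) := by
  show (c :: T).foldl PySem.Set.add PySem.Set.empty = _
  rw [List.foldl_cons]
  have : PySem.Set.add PySem.Set.empty c = [c] := by rfl
  rw [this, addFoldl_cons]
  rfl

-- Distinct-count is invariant under permutation.
theorem length_ofList_perm (xs ys : List Char) (h : xs.Perm ys) :
    (PySem.Set.ofList xs).length = (PySem.Set.ofList ys).length := by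
  have : (PySem.Set.ofList xs).Perm (PySem.Set.ofList ys) := by
    rw [List.perm_ext_iff_of_nodup (PySem.Set.nodup_ofList xs) (PySem.Set.nodup_ofList ys)]
    intro a
    rw [PySem.Set.mem_ofList, PySem.Set.mem_ofList]
    exact ⟨fun ha => h.mem_iff.mp ha, fun ha => h.mem_iff.mpr ha⟩
  exact this.length_eq

-- B's scan step.
def pvStep (st : Int × Option Char) (c : Char) : Int × Option Char :=
  if some c ≠ st.2 then (st.1 + 1, some c) else st

-- Invariant of B's scan over a sorted tail: with prev = some p and p ≤ every element,
-- the counter grows by the number of distinct elements other than p.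
theorem scan_invariant : ∀ (S : List Char), S.Pairwise (· ≤ ·) →
    ∀ (p : Char) (k : Int), (∀ c ∈ S, p ≤ c) →
      (S.foldl pvStep (k, some p)).1
        = k + ((PySem.Set.ofList (S.filter (fun c => c ≠ p))).length : Int) := by
  intro S
  induction S with
  | nil => intro _ p k _; simp [PySem.Set.ofList, PySem.Set.empty]
  | cons c T ih =>
      intro hpw p k hge
      have hT : T.Pairwise (· ≤ ·) := hpw.of_cons
      have hcT : ∀ t ∈ T, c ≤ t := fun t ht => (List.pairwise_cons.mp hpw).1 t ht
      by_cases hcp : c = p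
      · subst hcp
        have hstep : pvStep (k, some c) c = (k, some c) := by simp [pvStep]
        rw [List.foldl_cons, hstep, ih hT c k hcT]
        simp
      · have hpc : p < c := lt_of_le_of_ne (hge c (by simp)) (Ne.symm hcp)
        have hstep : pvStep (k, some p) c = (k + 1, some c) := by
          simp [pvStep, Option.some_inj.ne.mpr hcp]
        rw [List.foldl_cons, hstep, ih hT c (k + 1) hcT]
        have hfilT : T.filter (fun x => x ≠ p) = T := by
          apply List.filter_eq_self.mpr
          intro t ht
          simp only [ne_eq, decide_eq_true_eq]
          exact (ne_of_lt (lt_of_lt_of_le hpc (hcT t ht))).symm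
        have hfil : (c :: T).filter (fun x => x ≠ p) = c :: T := by
          rw [List.filter_cons, hfilT]
          simp [hcp]
        rw [hfil, ofList_cons]
        simp
        omega

-- B's scan of a sorted list counts its distinct elements.
theorem scan_sorted (S : List Char) (hpw : S.Pairwise (· ≤ ·)) :
    (S.foldl pvStep (0, none)).1 = ((PySem.Set.ofList S).length : Int) := by
  cases S with
  | nil => simp [PySem.Set.ofList, PySem.Set.empty]
  | cons c T =>
      have hstep : pvStep (0, none) c = (1, some c) := by simp [pvStep]
      rw [List.foldl_cons, hstep,
          scan_invariant T hpw.of_cons c 1 (fun t ht => (List.pairwise_cons.mp hpw).1 t ht),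
          ofList_cons]
      simp
      omega

-- ===== VERDICT (by name: the statement is the Claim_ definition above) =====
theorem maxdistinct_spec : Claim_equal_maxdistinct := by
  intro str n hdom hpre
  unfold Spec_maxdistinct maxdistinct maxdistinct_alt
  have hrange : PySem.List.pyRange 0 n 1 = PySem.List.pyRange 0 ((n.toNat : Nat) : Int) 1 := by
    rcases (by omega : 0 ≤ n ∨ n < 0) with h | h
    · rw [Int.toNat_of_nonneg h]
    · rw [PySem.List.pyRange_one_eq_nil (by omega), PySem.List.pyRange_one_eq_nil (by omega)]
  have hk : n.toNat ≤ str.toList.length := by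
    unfold Pre_maxdistinct at hpre; omega
  simp only [hrange]
  rw [foldl_pyRange_take
        (fun count c => PySem.List.pySetD count ((c.toNat : Int))
          (PySem.List.pyGetD count ((c.toNat : Int)) 0 + 1)) ' ' n.toNat str.toList _ hk,
      map_pyRange_take ' ' n.toNat str.toList hk]
  have hL : ∀ c ∈ str.toList.take n.toNat, c.toNat < 256 := by
    intro c hc
    have hc' : c ∈ str.toList := List.mem_of_mem_take hc
    unfold Dom_maxdistinct pvDomStr pvDomChar at hdom
    simp only [Bool.and_eq_true, List.all_eq_true] at hdom
    have := hdom.1 c hc'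
    simp only [Bool.or_eq_true, Bool.and_eq_true, decide_eq_true_eq, beq_iff_eq] at this
    omega
  rw [core (str.toList.take n.toNat) hL]
  have hpw : (PySem.List.sorted (str.toList.take n.toNat) (fun c => c) false).Pairwise (· ≤ ·) :=
    PySem.List.sorted_pairwise (str.toList.take n.toNat) (fun c => c)
  have hscan := scan_sorted (PySem.List.sorted (str.toList.take n.toNat) (fun c => c) false) hpw
  have hperm := PySem.List.sorted_perm (str.toList.take n.toNat) (fun c => c) false
  rw [show (fun (st : Int × Option Char) c =>
        if some c ≠ st.2 then (st.1 + 1, some c) else st) = pvStep from rfl]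
  rw [hscan, length_ofList_perm _ _ hperm]
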